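-- pv_equiv track=rewrite | github.com/fina3/microcap | src/data/collector.py | is_us_ticker
-- ===== SOURCE A (Python) =====
-- def is_us_ticker(ticker: str) -> bool:
--     """
--     Check if ticker is a US stock.
--
--     Filters out international stocks by checking for country suffixes.
--
--     Args:
--         ticker: Stock ticker symbol
--
--     Returns:
--         True if US stock, False otherwise
--     """
--     # Common non-US suffixes
--     non_us_suffixes = [
--         '.L',   # London
--         '.TO',  # Toronto
--         '.V',   # Vancouver
--         '.AX',  # Australia
--         '.NS',  # India NSE
--         '.BO',  # India BSE
--         '.HK',  # Hong Kong
--         '.T',   # Tokyo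
--         '.PA',  # Paris
--         '.DE',  # Germany
--         '.SW',  # Switzerland
--         '.MI',  # Milan
--         '.AS',  # Amsterdam
--         '.BR',  # Brussels
--         '.CO',  # Copenhagen
--         '.HE',  # Helsinki
--         '.OL',  # Oslo
--         '.ST',  # Stockholm
--     ]
--
--     ticker_upper = ticker.upper()
--
--     for suffix in non_us_suffixes:
--         if ticker_upper.endswith(suffix):
--             return False
--
--     return True
-- ===== SOURCE B (Python) =====
-- _NON_US_SUFFIXES = {
--     '.L', '.TO', '.V', '.AX', '.NS', '.BO', '.HK', '.T', '.PA',
--     '.DE', '.SW', '.MI', '.AS', '.BR', '.CO', '.HE', '.OL', '.ST',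
-- }
--
--
-- def is_us_ticker(ticker: str) -> bool:
--     """True if the ticker carries none of the known non-US exchange suffixes."""
--     t = ticker.upper()
--     if '.' not in t:
--         return True
--     # candidate suffix = '.' + segment after the last dot; one set lookup decides
--     return '.' + t.rsplit('.', 1)[1] not in _NON_US_SUFFIXES
-- ===== Notes on version B (the rewrite author's own statement) =====
-- stated objective: idiomatic
-- what changed: Instead of scanning all 18 known suffixes with endswith, B computes the ticker's own candidate suffix once ('.' + segment after the last dot of the uppercased ticker) and decides with a single set membership test.
import Mathlib
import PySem

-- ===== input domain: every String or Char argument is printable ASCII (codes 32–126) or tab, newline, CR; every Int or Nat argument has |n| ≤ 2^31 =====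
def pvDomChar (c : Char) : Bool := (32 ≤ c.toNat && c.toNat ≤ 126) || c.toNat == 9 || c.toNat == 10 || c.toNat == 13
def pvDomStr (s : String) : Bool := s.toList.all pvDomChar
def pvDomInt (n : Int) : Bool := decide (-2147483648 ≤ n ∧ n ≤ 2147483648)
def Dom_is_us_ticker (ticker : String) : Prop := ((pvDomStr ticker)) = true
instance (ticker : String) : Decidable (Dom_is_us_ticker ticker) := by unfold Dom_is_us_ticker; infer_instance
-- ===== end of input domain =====

-- B replaces A's scan over the 18 suffixes by computing the ticker's own candidate
-- suffix once and doing a single set membership test (objective: idiomatic).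

-- ===== PORT A =====
def pvSuffixesA : List String :=
  [".L", ".TO", ".V", ".AX", ".NS", ".BO", ".HK", ".T", ".PA",
   ".DE", ".SW", ".MI", ".AS", ".BR", ".CO", ".HE", ".OL", ".ST"]

-- the 'for suffix in non_us_suffixes: if …: return False' loop
def pvLoopA (tickerUpper : String) : List String → Bool
  | [] => true
  | s :: rest => if PySem.Str.endswith tickerUpper s then false else pvLoopA tickerUpper rest

def is_us_ticker (ticker : String) : Bool :=
  pvLoopA (PySem.Str.upper ticker) pvSuffixesA

-- ===== PORT B =====
def pvNonUsSet : List String :=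
  [".L", ".TO", ".V", ".AX", ".NS", ".BO", ".HK", ".T", ".PA",
   ".DE", ".SW", ".MI", ".AS", ".BR", ".CO", ".HE", ".OL", ".ST"]

def is_us_ticker_alt (ticker : String) : Bool :=
  let t := PySem.Str.upper ticker
  if PySem.Str.isIn "." t then
    -- t.rsplit('.', 1)[1]: the segment after the LAST '.' (exact hand port; PySem has no rsplit)
    let tail := (t.toList.reverse.takeWhile (fun c => c ≠ '.')).reverse
    !(pvNonUsSet.contains (String.ofList ('.' :: tail)))
  else
    true

-- ===== PRECONDITION & SPEC =====
def Spec_is_us_ticker (ticker : String) (out : Bool) : Prop := out = is_us_ticker_alt ticker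
instance (ticker : String) (out : Bool) : Decidable (Spec_is_us_ticker ticker out) := by unfold Spec_is_us_ticker; infer_instance

-- ===== CLAIM (what is proved, stated in full; the proofs are below) =====
def Claim_equal_is_us_ticker : Prop := ∀ (ticker : String), Dom_is_us_ticker ticker → Spec_is_us_ticker ticker (is_us_ticker ticker)

-- ===== LEMMAS AND PROOFS =====

-- A's early-return loop returns true iff no suffix matches
lemma pvLoopA_eq_true_iff (tu : String) (ss : List String) :
    pvLoopA tu ss = true ↔ ∀ s ∈ ss, ¬ (s.toList <:+ tu.toList) := by
  induction ss with
  | nil => simp [pvLoopA]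
  | cons s rest ih =>
      by_cases h : s.toList <:+ tu.toList
      · have he : PySem.Chars.endswith tu.toList s.toList = true :=
          (PySem.Chars.endswith_iff _ _).mpr h
        simp [pvLoopA, he, h]
      · have he : PySem.Chars.endswith tu.toList s.toList = false := by
          rw [Bool.eq_false_iff]
          intro hh
          exact h ((PySem.Chars.endswith_iff _ _).mp hh)
        simp [pvLoopA, he, h, ih]

lemma singleton_infix_iff (a : Char) (l : List Char) : [a] <:+: l ↔ a ∈ l := by
  constructor
  · rintro ⟨s, t, rfl⟩; simp
  · intro h
    rcases List.mem_iff_append.mp h with ⟨s, t, rfl⟩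
    exact ⟨s, t, by simp⟩

lemma takeWhile_all_append {α : Type} (p : α → Bool) (a : List α) (c : α) (b : List α)
    (ha : ∀ x ∈ a, p x = true) (hc : p c = false) :
    (a ++ c :: b).takeWhile p = a := by
  induction a with
  | nil => simp [hc]
  | cons x xs ih =>
      have hx : p x = true := ha x (List.mem_cons_self)
      simp only [List.cons_append, List.takeWhile_cons, hx, if_true]
      rw [ih (fun y hy => ha y (List.mem_cons_of_mem _ hy))]

lemma dropWhile_head_false {α : Type} (p : α → Bool) :
    ∀ (r : List α) (c : α) (rest : List α), r.dropWhile p = c :: rest → p c = false := by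
  intro r
  induction r with
  | nil => intro c rest h; simp [List.dropWhile] at h
  | cons x xs ih =>
      intro c rest h
      by_cases hx : p x = true
      · rw [List.dropWhile_cons, if_pos hx] at h
        exact ih c rest h
      · rw [List.dropWhile_cons, if_neg hx] at h
        cases h
        simpa using hx

-- characterise 'ends with .w' via the segment after the last dot
lemma suffix_char (l w : List Char) (hw : ∀ c ∈ w, c ≠ '.') :
    ('.' :: w) <:+ l ↔ ('.' ∈ l ∧ l.reverse.takeWhile (fun c => c ≠ '.') = w.reverse) := by
  constructor
  · rintro ⟨pre, rfl⟩
    refine ⟨by simp, ?_⟩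
    have hrev : (pre ++ '.' :: w).reverse = w.reverse ++ '.' :: pre.reverse := by simp
    rw [hrev]
    exact takeWhile_all_append _ _ _ _
      (fun x hx => by simpa using hw x (List.mem_reverse.mp hx)) (by simp)
  · rintro ⟨hmem, htw⟩
    have hsplit := List.takeWhile_append_dropWhile
      (p := fun c => decide (c ≠ '.')) (l := l.reverse)
    rcases hdw : l.reverse.dropWhile (fun c => decide (c ≠ '.')) with _ | ⟨c, rest⟩
    · exfalso
      rw [hdw, List.append_nil] at hsplit
      have hdotmem : ('.' : Char) ∈ l.reverse.takeWhile (fun c => decide (c ≠ '.')) := by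
        rw [hsplit]; simpa using hmem
      have := List.mem_takeWhile_imp hdotmem
      simp at this
    · have hcdot : c = '.' := by
        have := dropWhile_head_false _ _ _ _ hdw
        simpa using this
      have hlrev : l.reverse = w.reverse ++ '.' :: rest := by
        rw [← hsplit, hdw, htw, hcdot]
      refine ⟨rest.reverse, ?_⟩
      have := congrArg List.reverse hlrev
      simp only [List.reverse_reverse, List.reverse_append, List.reverse_cons] at this
      rw [this]
      simp

-- the 18 suffixes with the leading dot stripped, as char lists
def pvWS : List (List Char) :=
  [['L'], ['T','O'], ['V'], ['A','X'], ['N','S'], ['B','O'], ['H','K'], ['T'], ['P','A'],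
   ['D','E'], ['S','W'], ['M','I'], ['A','S'], ['B','R'], ['C','O'], ['H','E'], ['O','L'], ['S','T']]

set_option maxRecDepth 100000 in
lemma pvSuffixesA_eq : pvSuffixesA = pvWS.map (fun w => String.ofList ('.' :: w)) := by rfl

set_option maxRecDepth 100000 in
lemma pvNonUsSet_eq : pvNonUsSet = pvWS.map (fun w => String.ofList ('.' :: w)) := by rfl

lemma pvWS_no_dot : ∀ w ∈ pvWS, ∀ c ∈ w, c ≠ '.' := by
  have h : pvWS.all (fun w => w.all (fun c => !(c == '.'))) = true := by rfl
  simp only [List.all_eq_true, Bool.not_eq_true', beq_eq_false_iff_ne] at h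
  exact h

-- ===== VERDICT (by name: the statement is the Claim_ definition above) =====
theorem is_us_ticker_spec : Claim_equal_is_us_ticker := by
  intro ticker _
  unfold Spec_is_us_ticker is_us_ticker is_us_ticker_alt
  rw [Bool.eq_iff_iff, pvLoopA_eq_true_iff]
  set t := PySem.Str.upper ticker with ht
  by_cases hd : ('.' : Char) ∈ t.toList
  · have hin : PySem.Str.isIn "." t = true := by
      simp only [PySem.Str.isIn_eq]
      exact (PySem.Chars.isIn_iff_infix _ _).mpr (by
        have h1 : (".".toList : List Char) = ['.'] := rfl
        rw [h1, singleton_infix_iff]; exact hd)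
    rw [if_pos hin, pvSuffixesA_eq, pvNonUsSet_eq]
    have key : ∀ w ∈ pvWS, (('.' :: w) <:+ t.toList ↔
        t.toList.reverse.takeWhile (fun c => c ≠ '.') = w.reverse) := by
      intro w hwmem
      rw [suffix_char _ _ (pvWS_no_dot w hwmem)]
      simp [hd]
    set tw := List.takeWhile (fun c => decide (c ≠ '.')) t.toList.reverse with htw
    simp only [Bool.not_eq_true']
    constructor
    · intro hall
      rw [Bool.eq_false_iff]
      intro hc
      rcases List.mem_map.mp (List.contains_iff_mem.mp hc) with ⟨w, hw, heq⟩
      have hcons : ('.' :: w) = ('.' :: tw.reverse) := String.ofList_inj.mp heq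
      have hw' : tw = w.reverse := by
        have h2 := (List.cons.injEq _ _ _ _).mp hcons
        rw [h2.2]
        simp
      exact hall _ (List.mem_map.mpr ⟨w, hw, rfl⟩) (by simpa using (key w hw).mpr hw')
    · intro hnc s hs hsuf
      rcases List.mem_map.mp hs with ⟨w, hw, rfl⟩
      have h1 : ('.' :: w) <:+ t.toList := by simpa using hsuf
      have h2 : tw = w.reverse := (key w hw).mp h1
      have hmem : String.ofList ('.' :: tw.reverse) ∈
          List.map (fun w => String.ofList ('.' :: w)) pvWS :=
        List.mem_map.mpr ⟨w, hw, by rw [h2]; simp⟩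
      have hcT := List.contains_iff_mem.mpr hmem
      rw [hcT] at hnc
      exact Bool.noConfusion hnc
  · have hin : PySem.Str.isIn "." t = false := by
      simp only [PySem.Str.isIn_eq]
      have h1 : (".".toList : List Char) = ['.'] := rfl
      rw [h1]
      exact (PySem.Chars.isIn_eq_false_iff _ _).mpr
        (fun hinf => hd ((singleton_infix_iff _ _).mp hinf))
    rw [if_neg (ne_true_of_eq_false hin), pvSuffixesA_eq]
    simp only [List.forall_mem_map, iff_true]
    intro w hwmem hsuf
    exact hd (hsuf.subset (by simp))
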